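-- pv_equiv track=rewrite | github.com/Mestreplek/Connect-Four-3D | main.py | check_four
-- ===== SOURCE A (Python) =====
-- def check_four(four: list[int]) -> int:
--     num : int = four[0]
--
--     for i in four:
--
--         if i == 0:
--             return 0
--         if i != num:
--             return 0
--     return num
-- ===== SOURCE B (Python) =====
-- def check_four(four: list[int]) -> int:
--     num: int = four[0]
--     return num if num != 0 and len(set(four)) == 1 else 0
-- ===== Notes on version B (the rewrite author's own statement) =====
-- stated objective: idiomatic
-- what changed: Replaces the early-exit loop with pairwise comparisons by a single distinct-value set: return four[0] if it is nonzero and len(set(four)) == 1, else 0.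
import Mathlib
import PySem

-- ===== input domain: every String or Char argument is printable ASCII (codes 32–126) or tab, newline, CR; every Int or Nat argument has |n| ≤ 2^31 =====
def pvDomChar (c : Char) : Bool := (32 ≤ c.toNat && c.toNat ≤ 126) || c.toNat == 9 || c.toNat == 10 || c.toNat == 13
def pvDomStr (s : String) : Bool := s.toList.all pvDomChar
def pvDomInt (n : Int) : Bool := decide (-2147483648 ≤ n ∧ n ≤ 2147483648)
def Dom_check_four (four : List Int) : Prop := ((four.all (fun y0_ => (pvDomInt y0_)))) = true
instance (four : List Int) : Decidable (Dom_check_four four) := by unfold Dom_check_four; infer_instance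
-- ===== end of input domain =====

-- B replaces A's early-exit pairwise-comparison loop by one distinct-value set test (idiomatic; same cost).

-- ===== PORT A =====
-- the 'for i in four' loop with its two early returns
def check_fourLoop : List Int → Int → Int
  | [], num => num
  | i :: rest, num => if i = 0 then 0 else if i ≠ num then 0 else check_fourLoop rest num

def check_four (four : List Int) : Int :=
  match PySem.List.pyGet? four 0 with
  | none => 0   -- four[0] raises IndexError in Python; excluded by Pre_check_four
  | some num => check_fourLoop four num

-- ===== PORT B =====
def check_four_alt (four : List Int) : Int :=
  match PySem.List.pyGet? four 0 with
  | none => 0   -- four[0] raises IndexError in Python; excluded by Pre_check_four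
  | some num => if num ≠ 0 ∧ PySem.Set.len (PySem.Set.ofList four) = 1 then num else 0

-- ===== PRECONDITION & SPEC =====
-- A (and B) raise IndexError on the empty list (four[0]); only that input is excluded.
def Pre_check_four (four : List Int) : Prop := four ≠ []
instance (four : List Int) : Decidable (Pre_check_four four) := by unfold Pre_check_four; infer_instance
def pvWitness_check_four : List Int := [3, 3, 3, 3]

def Spec_check_four (four : List Int) (out : Int) : Prop := out = check_four_alt four
instance (four : List Int) (out : Int) : Decidable (Spec_check_four four out) := by unfold Spec_check_four; infer_instance

-- ===== CLAIM (what is proved, stated in full; the proofs are below) =====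
def Claim_equal_check_four : Prop := ∀ (four : List Int), Dom_check_four four → Pre_check_four four → Spec_check_four four (check_four four)

-- ===== LEMMAS AND PROOFS =====

theorem check_fourLoop_char (l : List Int) (num : Int) :
    check_fourLoop l num = if ∀ x ∈ l, x = num ∧ x ≠ 0 then num else 0 := by
  induction l with
  | nil => simp [check_fourLoop]
  | cons i rest ih =>
    rw [check_fourLoop]
    by_cases h0 : i = 0
    · rw [if_pos h0, if_neg]
      intro h; exact (h i (by simp)).2 h0
    · rw [if_neg h0]
      by_cases hn : i = num
      · rw [if_neg (by simpa using hn), ih]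
        by_cases hall : ∀ x ∈ rest, x = num ∧ x ≠ 0
        · rw [if_pos hall, if_pos]
          intro x hx
          rcases List.mem_cons.mp hx with hx | hx
          · exact ⟨hx ▸ hn, hx ▸ h0⟩
          · exact hall x hx
        · rw [if_neg hall, if_neg]
          intro h; exact hall fun x hx => h x (List.mem_cons.mpr (Or.inr hx))
      · rw [if_pos (by simpa using hn), if_neg]
        intro h; exact hn (h i (by simp)).1

theorem foldl_add_len_mono (t : List Int) (s : List Int) :
    s.length ≤ (t.foldl PySem.Set.add s).length := by
  induction t generalizing s with
  | nil => simp
  | cons i rest ih =>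
    refine le_trans ?_ (ih (PySem.Set.add s i))
    unfold PySem.Set.add
    split <;> simp

theorem foldl_add_singleton (rest : List Int) (num : Int) :
    (rest.foldl PySem.Set.add [num]).length = 1 ↔ ∀ x ∈ rest, x = num := by
  induction rest with
  | nil => simp
  | cons i t ih =>
    by_cases h : i = num
    · subst h
      have hadd : PySem.Set.add [i] i = [i] := by
        simp [PySem.Set.add, PySem.Set.contains]
      rw [List.foldl_cons, hadd, ih]
      simp
    · constructor
      · intro hlen
        exfalso
        have hadd : PySem.Set.add [num] i = [num, i] := by
          simp [PySem.Set.add, PySem.Set.contains, h]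
        have hm := foldl_add_len_mono t [num, i]
        rw [List.foldl_cons, hadd] at hlen
        rw [hlen] at hm
        simp at hm
      · intro hall; exact absurd (hall i (by simp)) h

theorem set_len_char (num : Int) (rest : List Int) :
    PySem.Set.len (PySem.Set.ofList (num :: rest)) = 1 ↔ ∀ x ∈ rest, x = num := by
  rw [PySem.Set.ofList_eq_foldl]
  simp only [List.foldl]
  have h1 : PySem.Set.add ([] : List Int) num = [num] := by
    simp [PySem.Set.add, PySem.Set.contains]
  rw [h1]
  unfold PySem.Set.len
  exact_mod_cast foldl_add_singleton rest num

-- ===== VERDICT (by name: the statement is the Claim_ definition above) =====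
theorem check_four_spec : Claim_equal_check_four := by
  intro four _ hpre
  unfold Spec_check_four
  match four, hpre with
  | num :: rest, _ =>
    have hget : PySem.List.pyGet? (num :: rest) 0 = some num := by
      simp [PySem.List.pyGet?, PySem.List.pyIdx?]
    unfold check_four check_four_alt
    rw [hget]
    simp only [check_fourLoop_char, set_len_char]
    by_cases hnum : num = 0
    · subst hnum
      simp
    · by_cases hall : ∀ x ∈ rest, x = num
      · rw [if_pos, if_pos ⟨hnum, hall⟩]
        intro x hx
        rcases List.mem_cons.mp hx with hx | hx
        · exact ⟨hx, hx ▸ hnum⟩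
        · exact ⟨hall x hx, (hall x hx) ▸ hnum⟩
      · rw [if_neg, if_neg (fun h => hall h.2)]
        intro h
        exact hall fun x hx => (h x (List.mem_cons.mpr (Or.inr hx))).1
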